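-- pv_equiv track=rewrite | github.com/mpifr-vlbi/apex-tools | APECS/apecsVLBI/vexGetSources2cat.py | coordReformat
-- ===== SOURCE A (Python) =====
-- def coordReformat(s):
--         s = s.strip()
--         repl = list('hmd\'')
--         for c in repl:
--                 s = s.replace(c,':')
--         s = s.replace('s','')
--         s = s.replace('"','')
--         return s
-- ===== SOURCE B (Python) =====
-- def coordReformat(s):
--     out = []
--     for c in s.strip():
--         if c in "hmd'":
--             out.append(':')
--         elif c in 's"':
--             continue
--         else:
--             out.append(c)
--     return ''.join(out)
-- ===== Notes on version B (the rewrite author's own statement) =====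
-- stated objective: alternative
-- what changed: Replaces six sequential full-string replace passes with a single character-by-character pass over the stripped string that maps each delimiter letter to a colon and drops the seconds markers, collecting into a list joined once at the end.
import Mathlib
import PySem

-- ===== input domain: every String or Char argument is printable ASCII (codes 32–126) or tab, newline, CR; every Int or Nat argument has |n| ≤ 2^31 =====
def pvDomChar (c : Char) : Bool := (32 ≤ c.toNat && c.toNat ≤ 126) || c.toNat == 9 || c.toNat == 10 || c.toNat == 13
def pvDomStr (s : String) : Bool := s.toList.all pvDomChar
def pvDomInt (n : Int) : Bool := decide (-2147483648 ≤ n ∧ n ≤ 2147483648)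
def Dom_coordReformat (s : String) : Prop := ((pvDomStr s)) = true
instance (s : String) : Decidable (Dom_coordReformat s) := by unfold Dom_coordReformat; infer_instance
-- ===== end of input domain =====

-- B replaces six sequential full-string replace passes by one character-by-character pass (alternative decomposition; return value only).


-- ===== PORT A =====
-- s = s.strip(); for c in "hmd'": s = s.replace(c, ':'); s = s.replace('s',''); s = s.replace('"','')
def coordReformat (s : String) : String :=
  let s1 := PySem.Str.strip s
  let s2 := ['h', 'm', 'd', '\''].foldl
    (fun t c => PySem.Str.replace t (String.mk [c]) ":") s1
  let s3 := PySem.Str.replace s2 "s" ""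
  PySem.Str.replace s3 "\"" ""

-- ===== PORT B =====
-- single pass: append ':' for h/m/d/', skip s/", keep others; join at the end
def coordReformat_alt (s : String) : String :=
  let out := (PySem.Str.strip s).toList.foldl
    (fun acc c =>
      if c = 'h' ∨ c = 'm' ∨ c = 'd' ∨ c = '\'' then acc ++ [':']
      else if c = 's' ∨ c = '"' then acc
      else acc ++ [c]) []
  String.mk out

-- ===== PRECONDITION & SPEC =====
def Spec_coordReformat (s : String) (out : String) : Prop := out = coordReformat_alt s
instance (s : String) (out : String) : Decidable (Spec_coordReformat s out) := by unfold Spec_coordReformat; infer_instance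

-- ===== CLAIM (what is proved, stated in full; the proofs are below) =====
def Claim_equal_coordReformat : Prop := ∀ (s : String), Dom_coordReformat s → Spec_coordReformat s (coordReformat s)

-- ===== LEMMAS AND PROOFS =====

theorem mk_toList (l : List Char) : (String.mk l).toList = l :=
  Eq.symm (String.ofList_eq.mp rfl)

-- replace.go with a single-char pattern, characterised
theorem replace_go_single (a : Char) (new : List Char) :
    ∀ (l : List Char) (fuel : Nat) (acc : List Char), l.length ≤ fuel →
      PySem.Chars.replace.go [a] new fuel l acc
        = acc.reverse ++ l.flatMap (fun c => if c = a then new else [c]) := by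
  intro l
  induction l with
  | nil =>
    intro fuel acc _
    cases fuel <;> simp [PySem.Chars.replace.go]
  | cons c t ih =>
    intro fuel acc hf
    cases fuel with
    | zero => simp at hf
    | succ n =>
      by_cases hc : c = a
      · subst hc
        have hp : List.isPrefixOf [c] (c :: t) = true := by
          simp [List.isPrefixOf]
        rw [PySem.Chars.replace.go]
        simp only [hp, if_pos, List.length_cons, List.length_nil, List.drop_succ_cons,
          List.drop_zero]
        rw [ih _ _ (by simpa using Nat.le_of_succ_le_succ hf)]
        simp
      · have hp : List.isPrefixOf [a] (c :: t) = false := by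
          simp [List.isPrefixOf]; intro h; exact absurd h.symm hc
        rw [PySem.Chars.replace.go]
        rw [if_neg (by simp [hp])]
        rw [ih _ _ (by simpa using Nat.le_of_succ_le_succ hf)]
        simp [hc]

-- replace with a single-char pattern is a per-character flatMap
theorem replace_single (a : Char) (new l : List Char) :
    PySem.Chars.replace l [a] new = l.flatMap (fun c => if c = a then new else [c]) := by
  rw [PySem.Chars.replace]
  simp only [List.isEmpty_cons, if_neg Bool.false_ne_true]
  exact replace_go_single a new l l.length [] le_rfl

-- B's foldl with an output accumulator is a flatMap
theorem alt_foldl_flatMap (l acc : List Char) :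
    l.foldl (fun acc c =>
      if c = 'h' ∨ c = 'm' ∨ c = 'd' ∨ c = '\'' then acc ++ [':']
      else if c = 's' ∨ c = '"' then acc
      else acc ++ [c]) acc
    = acc ++ l.flatMap (fun c =>
        if c = 'h' ∨ c = 'm' ∨ c = 'd' ∨ c = '\'' then [':']
        else if c = 's' ∨ c = '"' then []
        else [c]) := by
  induction l generalizing acc with
  | nil => simp
  | cons c t ih =>
    simp only [List.foldl_cons, List.flatMap_cons, ih]
    split_ifs <;> simp

-- the six sequential single-char flatMaps agree with B's one-pass map on every character
theorem chain_eq_onepass (l : List Char) :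
    (((((l.flatMap (fun c => if c = 'h' then [':'] else [c])).flatMap
        (fun c => if c = 'm' then [':'] else [c])).flatMap
        (fun c => if c = 'd' then [':'] else [c])).flatMap
        (fun c => if c = '\'' then [':'] else [c])).flatMap
        (fun c => if c = 's' then ([] : List Char) else [c])).flatMap
        (fun c => if c = '"' then ([] : List Char) else [c])
    = l.flatMap (fun c =>
        if c = 'h' ∨ c = 'm' ∨ c = 'd' ∨ c = '\'' then [':']
        else if c = 's' ∨ c = '"' then []
        else [c]) := by
  simp only [List.flatMap_assoc]
  apply List.flatMap_congr  -- pointwise equality of the per-character maps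
  intro c _
  by_cases hh : c = 'h'; · subst hh; decide
  by_cases hm : c = 'm'; · subst hm; decide
  by_cases hd : c = 'd'; · subst hd; decide
  by_cases hq : c = '\''; · subst hq; decide
  by_cases hs : c = 's'; · subst hs; decide
  by_cases hg : c = '"'; · subst hg; decide
  simp [hh, hm, hd, hq, hs, hg]

-- ===== VERDICT (by name: the statement is the Claim_ definition above) =====
theorem coordReformat_spec : Claim_equal_coordReformat := by
  intro s _
  unfold Spec_coordReformat coordReformat coordReformat_alt
  apply String.toList_injective  -- compare the underlying character lists
  simp only [List.foldl_cons, List.foldl_nil, PySem.Str.toList_replace, PySem.Str.toList_strip]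
  rw [alt_foldl_flatMap]
  simp only [List.nil_append]
  rw [← chain_eq_onepass]
  simp [replace_single, mk_toList]
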